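-- pv_equiv track=rewrite | github.com/bcrowe306/MPCBlackScreenDev | mpc_studio_display/graphics.py | scale_bitmap_font
-- ===== SOURCE A (Python) =====
-- def scale_bitmap_font(font, char_width, char_height, scale_factor):
--     scaled_font = {}
--     for char, bitmap in font.items():
--         scaled_bitmap = []
--         for row in bitmap:
--             expanded_row = []
--             for bit in range(char_width):
--                 if row & (1 << (char_width - bit - 1)):
--                     expanded_row.extend([1] * scale_factor)
--                 else:
--                     expanded_row.extend([0] * scale_factor)
--             for _ in range(scale_factor):
--                 scaled_row = 0
--                 for bit in expanded_row:
--                     scaled_row = (scaled_row << 1) | bit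
--                 scaled_bitmap.append(scaled_row)
--         scaled_font[char] = scaled_bitmap
--     return scaled_font
-- ===== SOURCE B (Python) =====
-- def scale_bitmap_font(font, char_width, char_height, scale_factor):
--     # Direct bit-block construction: each set source bit becomes a block of
--     # scale_factor ones placed by one shift, instead of expanding every row
--     # into a bit list and re-folding it scale_factor times.
--     if scale_factor < 1:
--         return {char: [] for char in font}
--     mask = (1 << scale_factor) - 1
--
--     def scale_row(row):
--         sr = 0
--         for i in range(char_width):
--             p = char_width - i - 1
--             if row & (1 << p):
--                 sr += mask << (p * scale_factor)
--         return sr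
--
--     return {char: [v for row in bitmap for v in [scale_row(row)] * scale_factor]
--             for char, bitmap in font.items()}
-- ===== Notes on version B (the rewrite author's own statement) =====
-- stated objective: alternative
-- what changed: Each scaled row is computed directly by summing a precomputed block mask ((1<<scale_factor)-1) shifted into place for every set source bit, and repeated scale_factor times, instead of expanding every row into a 0/1 bit list and re-folding that whole list scale_factor times with shift-or.
import Mathlib
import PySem

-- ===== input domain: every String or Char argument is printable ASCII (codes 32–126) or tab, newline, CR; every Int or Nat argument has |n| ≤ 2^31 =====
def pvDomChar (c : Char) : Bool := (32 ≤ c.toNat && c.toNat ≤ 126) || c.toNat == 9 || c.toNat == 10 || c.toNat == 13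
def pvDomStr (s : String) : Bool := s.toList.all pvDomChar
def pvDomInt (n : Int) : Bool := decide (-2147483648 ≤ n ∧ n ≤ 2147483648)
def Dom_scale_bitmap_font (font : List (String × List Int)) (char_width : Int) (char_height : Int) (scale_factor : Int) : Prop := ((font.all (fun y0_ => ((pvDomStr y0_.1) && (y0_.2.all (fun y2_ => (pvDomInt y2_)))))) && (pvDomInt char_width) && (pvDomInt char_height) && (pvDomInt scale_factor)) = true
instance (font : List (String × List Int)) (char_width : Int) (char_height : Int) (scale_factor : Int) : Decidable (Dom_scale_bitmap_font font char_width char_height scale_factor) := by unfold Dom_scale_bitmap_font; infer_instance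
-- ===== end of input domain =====

-- B computes each scaled row directly by shifting a block mask into place per set source
-- bit (and repeats it scale_factor times), instead of A's expansion of every row into a
-- 0/1 list that is re-folded scale_factor times; objective: alternative (same O-class
-- modulo the scale_factor-fold rescan, not claimed faster).

-- ===== PORT A =====
-- Shift amounts in Python are ints, nonnegative wherever A evaluates them
-- (bit < char_width inside the range loop); '.toNat' is exact there.
-- '[1] * scale_factor' is empty for scale_factor ≤ 0, as is 'List.replicate scale_factor.toNat'.
def scale_bitmap_font (font : List (String × List Int)) (char_width : Int) (char_height : Int) (scale_factor : Int) : List (String × List Int) :=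
  (font.foldl (fun (scaled_font : PySem.Dict String (List Int)) kv =>
    scaled_font.insert kv.1
      (kv.2.foldl (fun scaled_bitmap row =>
        let expanded_row : List Int :=
          (PySem.List.pyRange 0 char_width 1).foldl (fun expanded_row bit =>
            if PySem.Int.band row ((1 : Int) <<< (char_width - bit - 1).toNat) ≠ 0 then
              expanded_row ++ List.replicate scale_factor.toNat (1 : Int)
            else
              expanded_row ++ List.replicate scale_factor.toNat (0 : Int)) []
        (PySem.List.pyRange 0 scale_factor 1).foldl (fun scaled_bitmap _ =>
          scaled_bitmap ++
            [expanded_row.foldl (fun scaled_row bit =>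
              PySem.Int.bor (scaled_row <<< (1 : Nat)) bit) 0]) scaled_bitmap) []))
    PySem.Dict.empty).items

-- ===== PORT B =====
-- scale_row of Source B; mask = (1 << scale_factor) - 1 is passed in (scale_factor ≥ 1 there,
-- and p ≥ 0 inside the loop, so '.toNat' on the shift amounts is exact).
def pvScaleRowB (char_width scale_factor mask row : Int) : Int :=
  (PySem.List.pyRange 0 char_width 1).foldl (fun sr i =>
    let p := char_width - i - 1
    if PySem.Int.band row ((1 : Int) <<< p.toNat) ≠ 0 then
      sr + (mask <<< (p * scale_factor).toNat)
    else sr) 0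

def scale_bitmap_font_alt (font : List (String × List Int)) (char_width : Int) (char_height : Int) (scale_factor : Int) : List (String × List Int) :=
  if scale_factor < 1 then
    (font.foldl (fun (d : PySem.Dict String (List Int)) kv => d.insert kv.1 ([] : List Int))
      PySem.Dict.empty).items
  else
    let mask : Int := ((1 : Int) <<< scale_factor.toNat) - 1
    (font.foldl (fun (d : PySem.Dict String (List Int)) kv =>
      d.insert kv.1 (kv.2.flatMap (fun row =>
        List.replicate scale_factor.toNat (pvScaleRowB char_width scale_factor mask row))))
      PySem.Dict.empty).items

-- ===== PRECONDITION & SPEC =====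
def Spec_scale_bitmap_font (font : List (String × List Int)) (char_width : Int) (char_height : Int) (scale_factor : Int) (out : List (String × List Int)) : Prop := out = scale_bitmap_font_alt font char_width char_height scale_factor
instance (font : List (String × List Int)) (char_width : Int) (char_height : Int) (scale_factor : Int) (out : List (String × List Int)) : Decidable (Spec_scale_bitmap_font font char_width char_height scale_factor out) := by unfold Spec_scale_bitmap_font; infer_instance

-- ===== CLAIM (what is proved, stated in full; the proofs are below) =====
def Claim_equal_scale_bitmap_font : Prop := ∀ (font : List (String × List Int)) (char_width : Int) (char_height : Int) (scale_factor : Int), Dom_scale_bitmap_font font char_width char_height scale_factor → Spec_scale_bitmap_font font char_width char_height scale_factor (scale_bitmap_font font char_width char_height scale_factor)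

-- ===== LEMMAS AND PROOFS =====

theorem pv_shl_eq (m : Int) (n : Nat) : m <<< n = m * 2 ^ n := by
  rw [← Int.shiftLeft_natCast_right, Int.shiftLeft_eq_mul_pow]; push_cast; ring

theorem pv_two_mul_lor_one (n : Nat) : 2 * n ||| 1 = 2 * n + 1 := by
  have h := Nat.lor_bit false n true 0
  simp [Nat.bit] at h
  omega

theorem pv_step1 (s : Int) (hs : 0 ≤ s) : PySem.Int.bor (s <<< (1 : Nat)) 1 = 2 * s + 1 := by
  rw [pv_shl_eq, pow_one]
  rw [PySem.Int.bor_of_nonneg (by positivity) (by norm_num)]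
  have h2 : (s * 2).toNat = 2 * s.toNat := by omega
  have h1 : (1 : Int).toNat = 1 := rfl
  rw [h2, h1, pv_two_mul_lor_one]
  omega

theorem pv_step0 (s : Int) : PySem.Int.bor (s <<< (1 : Nat)) 0 = 2 * s := by
  rw [PySem.Int.bor_zero, pv_shl_eq, pow_one]; ring

-- folding A's shift-or step over a block of k equal bits
theorem pv_fold_repl1 (k : Nat) : ∀ s : Int, 0 ≤ s →
    List.foldl (fun sr bit => PySem.Int.bor (sr <<< (1 : Nat)) bit) s (List.replicate k (1 : Int))
      = s * 2 ^ k + (2 ^ k - 1) := by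
  induction k with
  | zero => intro s _; simp
  | succ k ih =>
    intro s hs
    rw [List.replicate_succ, List.foldl_cons, pv_step1 s hs, ih (2 * s + 1) (by omega)]
    rw [pow_succ]; ring

theorem pv_fold_repl0 (k : Nat) : ∀ s : Int,
    List.foldl (fun sr bit => PySem.Int.bor (sr <<< (1 : Nat)) bit) s (List.replicate k (0 : Int))
      = s * 2 ^ k := by
  induction k with
  | zero => intro s; simp
  | succ k ih =>
    intro s
    rw [List.replicate_succ, List.foldl_cons, pv_step0 s, ih (2 * s)]
    rw [pow_succ]; ring

-- the central invariant: A's Horner fold over the expanded bit blocks equals B's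
-- positional block sums, related through the remaining width n
theorem pv_rowkey (row char_width scale_factor : Int) (hsf : 1 ≤ scale_factor) :
    ∀ (n : Nat) (i a : Int), 0 ≤ a → i + n = char_width →
    List.foldl (fun a x =>
        List.foldl (fun sr bit => PySem.Int.bor (sr <<< (1 : Nat)) bit) a
          (if PySem.Int.band row ((1 : Int) <<< (char_width - x - 1).toNat) ≠ 0 then
            List.replicate scale_factor.toNat (1 : Int)
          else List.replicate scale_factor.toNat (0 : Int)))
      a (PySem.List.pyRange i char_width 1)
    = List.foldl (fun sr i =>
        let p := char_width - i - 1
        if PySem.Int.band row ((1 : Int) <<< p.toNat) ≠ 0 then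
          sr + ((((1 : Int) <<< scale_factor.toNat) - 1) <<< (p * scale_factor).toNat)
        else sr)
      (a * 2 ^ (n * scale_factor.toNat)) (PySem.List.pyRange i char_width 1) := by
  intro n
  induction n with
  | zero =>
    intro i a ha hi
    rw [PySem.List.pyRange_one_eq_nil (by omega)]
    simp
  | succ n ih =>
    intro i a ha hi
    have hilt : i < char_width := by omega
    have h2 : (0 : Int) < 2 ^ scale_factor.toNat := by positivity
    have hp : char_width - i - 1 = (n : Int) := by omega
    have hsfc : (scale_factor : Int) = (scale_factor.toNat : Int) := by omega
    have hpn : ((char_width - i - 1) * scale_factor).toNat = n * scale_factor.toNat := by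
      have h : (char_width - i - 1) * scale_factor = ((n * scale_factor.toNat : Nat) : Int) := by
        rw [hp]; push_cast; linear_combination (n : Int) * hsfc
      rw [h, Int.toNat_natCast]
    have hmask : (((1 : Int) <<< scale_factor.toNat) - 1) = 2 ^ scale_factor.toNat - 1 := by
      rw [pv_shl_eq]; ring
    have hpow : (2 : Int) ^ ((n + 1) * scale_factor.toNat)
        = 2 ^ (n * scale_factor.toNat) * 2 ^ scale_factor.toNat := by
      rw [show (n + 1) * scale_factor.toNat = n * scale_factor.toNat + scale_factor.toNat from by ring,
        pow_add]
    rw [PySem.List.pyRange_one_cons hilt]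
    simp only [List.foldl_cons]
    by_cases hb : PySem.Int.band row ((1 : Int) <<< (char_width - i - 1).toNat) ≠ 0
    · rw [if_pos hb, if_pos hb, pv_fold_repl1 scale_factor.toNat a ha]
      rw [ih (i + 1) (a * 2 ^ scale_factor.toNat + (2 ^ scale_factor.toNat - 1))
        (by have := mul_nonneg ha h2.le; linarith) (by omega)]
      congr 1
      rw [hpn, pv_shl_eq, hmask, hpow]
      ring
    · rw [if_neg hb, if_neg hb, pv_fold_repl0 scale_factor.toNat a]
      rw [ih (i + 1) (a * 2 ^ scale_factor.toNat) (mul_nonneg ha h2.le) (by omega)]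
      congr 1
      rw [hpow]
      ring

-- per-row value equality (scale_factor ≥ 1)
theorem pv_row_eq (row char_width scale_factor : Int) (hsf : 1 ≤ scale_factor) :
    ((PySem.List.pyRange 0 char_width 1).foldl (fun expanded_row bit =>
        if PySem.Int.band row ((1 : Int) <<< (char_width - bit - 1).toNat) ≠ 0 then
          expanded_row ++ List.replicate scale_factor.toNat (1 : Int)
        else
          expanded_row ++ List.replicate scale_factor.toNat (0 : Int)) []).foldl
      (fun scaled_row bit => PySem.Int.bor (scaled_row <<< (1 : Nat)) bit) 0
    = pvScaleRowB char_width scale_factor (((1 : Int) <<< scale_factor.toNat) - 1) row := by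
  have hexp : (PySem.List.pyRange 0 char_width 1).foldl (fun expanded_row bit =>
        if PySem.Int.band row ((1 : Int) <<< (char_width - bit - 1).toNat) ≠ 0 then
          expanded_row ++ List.replicate scale_factor.toNat (1 : Int)
        else
          expanded_row ++ List.replicate scale_factor.toNat (0 : Int)) []
      = (PySem.List.pyRange 0 char_width 1).flatMap (fun bit =>
          if PySem.Int.band row ((1 : Int) <<< (char_width - bit - 1).toNat) ≠ 0 then
            List.replicate scale_factor.toNat (1 : Int)
          else List.replicate scale_factor.toNat (0 : Int)) := by
    rw [PySem.List.foldl_congr_mem _ _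
      (fun acc x => acc ++ (if PySem.Int.band row ((1 : Int) <<< (char_width - x - 1).toNat) ≠ 0 then
          List.replicate scale_factor.toNat (1 : Int)
        else List.replicate scale_factor.toNat (0 : Int))) _
      (by intro acc x _; beta_reduce; split_ifs <;> rfl)]
    rw [PySem.List.foldl_append_eq_flatMap]
    rfl
  rw [hexp, List.foldl_flatMap]
  unfold pvScaleRowB
  by_cases hcw : 0 ≤ char_width
  · have hkey := pv_rowkey row char_width scale_factor hsf char_width.toNat 0 0 le_rfl (by omega)
    simpa using hkey
  · rw [PySem.List.pyRange_one_eq_nil (by omega)]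
    simp

-- an inner loop appending a constant singleton is an append of replicate
theorem pv_foldl_append_const {α : Type} (L : List Int) (x : α) :
    ∀ acc : List α, L.foldl (fun acc _ => acc ++ [x]) acc = acc ++ List.replicate L.length x := by
  induction L with
  | nil => intro acc; simp
  | cons y ys ih =>
    intro acc
    simp only [List.foldl_cons, List.length_cons, ih (acc ++ [x]), List.append_assoc]
    rw [List.singleton_append, ← List.replicate_succ]

theorem pv_foldl_fixed {α β : Type} (L : List α) : ∀ acc : β, L.foldl (fun acc _ => acc) acc = acc := by
  induction L with
  | nil => intro acc; rfl
  | cons y ys ih => intro acc; exact ih acc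

-- ===== VERDICT (by name: the statement is the Claim_ definition above) =====
theorem scale_bitmap_font_spec : Claim_equal_scale_bitmap_font := by
  intro font char_width char_height scale_factor _
  unfold Spec_scale_bitmap_font scale_bitmap_font
  by_cases hsf : scale_factor < 1
  · have halt : scale_bitmap_font_alt font char_width char_height scale_factor
        = (font.foldl (fun (d : PySem.Dict String (List Int)) kv => d.insert kv.1 ([] : List Int))
            PySem.Dict.empty).items := by
      unfold scale_bitmap_font_alt; rw [if_pos hsf]
    rw [halt]
    congr 1
    apply PySem.List.foldl_congr_mem
    intro d kv _
    congr 1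
    have hr : PySem.List.pyRange 0 scale_factor 1 = [] :=
      PySem.List.pyRange_one_eq_nil (by omega)
    rw [PySem.List.foldl_congr_mem _ _ (fun (sb : List Int) (_ : Int) => sb) _
      (by intro sb row _; simp [hr])]
    exact pv_foldl_fixed kv.2 []
  · have hsf1 : 1 ≤ scale_factor := by omega
    have halt : scale_bitmap_font_alt font char_width char_height scale_factor
        = (font.foldl (fun (d : PySem.Dict String (List Int)) kv =>
            d.insert kv.1 (kv.2.flatMap (fun row =>
              List.replicate scale_factor.toNat
                (pvScaleRowB char_width scale_factor (((1 : Int) <<< scale_factor.toNat) - 1) row))))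
            PySem.Dict.empty).items := by
      unfold scale_bitmap_font_alt; rw [if_neg hsf]
    rw [halt]
    congr 1
    apply PySem.List.foldl_congr_mem
    intro d kv _
    congr 1
    rw [PySem.List.foldl_congr_mem _ _
      (fun (sb : List Int) (row : Int) => sb ++ List.replicate scale_factor.toNat
        (pvScaleRowB char_width scale_factor (((1 : Int) <<< scale_factor.toNat) - 1) row)) _
      (by
        intro sb row _
        simp only [pv_foldl_append_const, PySem.List.length_pyRange_one, sub_zero,
          pv_row_eq row char_width scale_factor hsf1])]
    rw [PySem.List.foldl_append_eq_flatMap]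
    rfl
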